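-- pv_equiv track=rewrite | github.com/Sheshadri-1992/BayesClassifier | k_cross_validation.py | storeDataInMemory
-- ===== SOURCE A (Python) =====
-- def storeDataInMemory(samples):
--
-- 	myDict = {}
-- 	for row in samples:
-- 		class_ = row[-1]
--
-- 		if class_ not in myDict:
-- 			myDict[class_] = {}
--
-- 		for i in range(len(row)-1):
-- 			if i not in myDict[class_]:
-- 				myDict[class_][i] = {}
--
-- 			featureVal = row[i]
-- 			if featureVal not in myDict[class_][i]:
-- 				myDict[class_][i][featureVal] = 1
-- 			else:
-- 				myDict[class_][i][featureVal] = myDict[class_][i][featureVal] + 1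
--
-- 	return myDict
-- ===== SOURCE B (Python) =====
-- def storeDataInMemory(samples):
--     # Pass 1: flat aggregation of (class, feature-index, feature-value) triples.
--     counts = {}
--     for row in samples:
--         class_ = row[-1]
--         for i in range(len(row) - 1):
--             key = (class_, i, row[i])
--             counts[key] = counts.get(key, 0) + 1
--     # Pass 2: reshape the flat counter into the nested dict-of-dicts.
--     result = {}
--     for row in samples:
--         result.setdefault(row[-1], {})
--     for (class_, i, value), n in counts.items():
--         result[class_].setdefault(i, {})[value] = n
--     return result
-- ===== Notes on version B (the rewrite author's own statement) =====
-- stated objective: alternative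
-- what changed: Replaces A's nested-incremental single pass (building dict-of-dict-of-dict counts in place row by row) with an aggregate-then-reshape two-pass structure: one flat dict keyed by (class, index, value) triples collects all counts, then a reshape loop over its items builds the nested result.
import Mathlib
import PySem

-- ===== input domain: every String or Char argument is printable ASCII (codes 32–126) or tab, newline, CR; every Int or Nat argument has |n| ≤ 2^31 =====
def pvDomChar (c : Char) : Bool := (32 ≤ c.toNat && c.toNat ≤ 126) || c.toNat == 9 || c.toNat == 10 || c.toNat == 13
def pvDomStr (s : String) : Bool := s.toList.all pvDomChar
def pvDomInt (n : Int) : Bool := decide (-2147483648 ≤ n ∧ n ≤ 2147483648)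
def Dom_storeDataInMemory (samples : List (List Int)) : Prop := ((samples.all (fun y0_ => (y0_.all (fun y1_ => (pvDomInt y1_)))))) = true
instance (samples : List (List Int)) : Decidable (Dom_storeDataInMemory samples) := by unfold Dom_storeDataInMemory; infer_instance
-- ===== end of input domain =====

-- B replaces A's nested-incremental single pass by a flat (class, index, value) counter
-- plus a reshape loop; equivalence of the returned nested dicts is proved below (alternative, not faster).


-- ===== PORT A =====
-- body of A's inner 'for i in range(len(row)-1)' loop, acting on the whole nested dict
def pvABody (class_ : Int) (row : List Int) (myDict : PySem.Dict Int (PySem.Dict Int (PySem.Dict Int Int))) (i : Int) :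
    PySem.Dict Int (PySem.Dict Int (PySem.Dict Int Int)) :=
  let inner := myDict.getD class_ PySem.Dict.empty
  let myDict := if inner.contains i then myDict else myDict.insert class_ (inner.insert i PySem.Dict.empty)
  let inner := myDict.getD class_ PySem.Dict.empty
  let featureVal := PySem.List.pyGetD row i 0
  let leaf := inner.getD i PySem.Dict.empty
  let leaf := if leaf.contains featureVal then leaf.insert featureVal (leaf.getD featureVal 0 + 1)
              else leaf.insert featureVal 1
  myDict.insert class_ (inner.insert i leaf)

-- body of A's outer 'for row in samples' loop
def pvAStep (myDict : PySem.Dict Int (PySem.Dict Int (PySem.Dict Int Int))) (row : List Int) :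
    PySem.Dict Int (PySem.Dict Int (PySem.Dict Int Int)) :=
  match PySem.List.pyGet? row (-1) with
  | none => myDict    -- Python raises IndexError on an empty row; excluded by Pre_
  | some class_ =>
    let myDict := if myDict.contains class_ then myDict else myDict.insert class_ PySem.Dict.empty
    (PySem.List.pyRange 0 ((row.length : Int) - 1) 1).foldl (pvABody class_ row) myDict

def storeDataInMemory (samples : List (List Int)) : List (Int × List (Int × List (Int × Int))) :=
  (samples.foldl pvAStep PySem.Dict.empty).items.map (fun p => (p.1, p.2.items.map (fun q => (q.1, q.2.items))))

-- ===== PORT B =====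
-- pass 1: flat counter over (class, index, value) triples
def pvCountStep (counts : PySem.Dict (Int × Int × Int) Int) (row : List Int) : PySem.Dict (Int × Int × Int) Int :=
  match PySem.List.pyGet? row (-1) with
  | none => counts    -- Python raises IndexError on an empty row; excluded by Pre_
  | some class_ =>
    (PySem.List.pyRange 0 ((row.length : Int) - 1) 1).foldl (fun counts i =>
      let key := (class_, i, PySem.List.pyGetD row i 0)
      counts.insert key (counts.getD key 0 + 1)) counts

-- pass 2a: result.setdefault(row[-1], {})
def pvInitStep (result : PySem.Dict Int (PySem.Dict Int (PySem.Dict Int Int))) (row : List Int) :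
    PySem.Dict Int (PySem.Dict Int (PySem.Dict Int Int)) :=
  match PySem.List.pyGet? row (-1) with
  | none => result
  | some class_ => result.setdefault class_ PySem.Dict.empty

-- pass 2b: result[class_].setdefault(i, {})[value] = n
def pvPlace (result : PySem.Dict Int (PySem.Dict Int (PySem.Dict Int Int))) (e : (Int × Int × Int) × Int) :
    PySem.Dict Int (PySem.Dict Int (PySem.Dict Int Int)) :=
  let inner := (result.getD e.1.1 PySem.Dict.empty).setdefault e.1.2.1 PySem.Dict.empty
  result.insert e.1.1 (inner.insert e.1.2.1 ((inner.getD e.1.2.1 PySem.Dict.empty).insert e.1.2.2 e.2))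

def storeDataInMemory_alt (samples : List (List Int)) : List (Int × List (Int × List (Int × Int))) :=
  let counts := samples.foldl pvCountStep PySem.Dict.empty
  let result := counts.items.foldl pvPlace (samples.foldl pvInitStep PySem.Dict.empty)
  result.items.map (fun p => (p.1, p.2.items.map (fun q => (q.1, q.2.items))))

-- ===== PRECONDITION & SPEC =====
-- A evaluates row[-1], which raises IndexError on an empty row: Pre_ excludes samples containing an empty row.
def Pre_storeDataInMemory (samples : List (List Int)) : Prop := ∀ row ∈ samples, row ≠ []
instance (samples : List (List Int)) : Decidable (Pre_storeDataInMemory samples) := by unfold Pre_storeDataInMemory; infer_instance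
def pvWitness_storeDataInMemory : List (List Int) := [[1, 0], [2, 1, 0], [0]]

def Spec_storeDataInMemory (samples : List (List Int)) (out : List (Int × List (Int × List (Int × Int)))) : Prop := out = storeDataInMemory_alt samples
instance (samples : List (List Int)) (out : List (Int × List (Int × List (Int × Int)))) : Decidable (Spec_storeDataInMemory samples out) := by unfold Spec_storeDataInMemory; infer_instance

-- ===== CLAIM (what is proved, stated in full; the proofs are below) =====
def Claim_equal_storeDataInMemory : Prop := ∀ (samples : List (List Int)), Dom_storeDataInMemory samples → Pre_storeDataInMemory samples → Spec_storeDataInMemory samples (storeDataInMemory samples)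


-- ===== LEMMAS AND PROOFS =====

-- shorthand types used only by the proofs
abbrev pvD3 : Type := PySem.Dict Int Int
abbrev pvD2 : Type := PySem.Dict Int pvD3
abbrev pvD1 : Type := PySem.Dict Int pvD2
abbrev pvK : Type := Int × Int × Int

-- A's inner-loop body with the triple (class, index, value) taken directly
def pvStepT (d : pvD1) (k : pvK) : pvD1 :=
  let inner := d.getD k.1 PySem.Dict.empty
  let d := if inner.contains k.2.1 then d else d.insert k.1 (inner.insert k.2.1 PySem.Dict.empty)
  let inner := d.getD k.1 PySem.Dict.empty
  let leaf := inner.getD k.2.1 PySem.Dict.empty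
  let leaf := if leaf.contains k.2.2 then leaf.insert k.2.2 (leaf.getD k.2.2 0 + 1)
              else leaf.insert k.2.2 1
  d.insert k.1 (inner.insert k.2.1 leaf)

-- the common normal form of one three-level update "X[c][i][v] = n"
def pvNP (X : pvD1) (c i v n : Int) : pvD1 :=
  X.insert c ((X.getD c PySem.Dict.empty).insert i
    (((X.getD c PySem.Dict.empty).getD i PySem.Dict.empty).insert v n))

def pvSlotD (X : pvD1) (k : pvK) : Int :=
  ((X.getD k.1 PySem.Dict.empty).getD k.2.1 PySem.Dict.empty).getD k.2.2 0

def pvHasSlot (X : pvD1) (k : pvK) : Bool :=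
  ((X.getD k.1 PySem.Dict.empty).getD k.2.1 PySem.Dict.empty).contains k.2.2

lemma pv_setdefault_insert {κ ν : Type} [BEq κ] [LawfulBEq κ] (d : PySem.Dict κ ν) (a : κ) (x y : ν) :
    (d.setdefault a x).insert a y = d.insert a y := by
  by_cases h : d.contains a = true
  · rw [PySem.Dict.setdefault_of_contains d x h]
  · rw [PySem.Dict.setdefault_of_not_contains d x (by simpa using h), PySem.Dict.insert_insert_self]

lemma pv_place_eq (X : pvD1) (e : pvK × Int) :
    pvPlace X e = pvNP X e.1.1 e.1.2.1 e.1.2.2 e.2 := by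
  unfold pvPlace pvNP
  simp only [pv_setdefault_insert, PySem.Dict.getD_setdefault_self]

lemma pv_stepT_eq_NP (d : pvD1) (k : pvK) :
    pvStepT d k = pvNP d k.1 k.2.1 k.2.2 (pvSlotD d k + 1) := by
  unfold pvStepT pvNP pvSlotD
  by_cases hi : (d.getD k.1 PySem.Dict.empty).contains k.2.1 = true
  · by_cases hv : ((d.getD k.1 PySem.Dict.empty).getD k.2.1 PySem.Dict.empty).contains k.2.2 = true
    · simp [hi, hv]
    · simp [hi, hv, PySem.Dict.getD_of_not_contains _ _ (by simpa using hv)]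
  · have hi' : (d.getD k.1 PySem.Dict.empty).contains k.2.1 = false := by simpa using hi
    have hd : (d.getD k.1 PySem.Dict.empty).getD k.2.1 PySem.Dict.empty = PySem.Dict.empty :=
      PySem.Dict.getD_of_not_contains _ _ hi'
    simp [hi', hd, PySem.Dict.getD_insert_self, PySem.Dict.insert_insert_self]

-- insert at a key already present commutes with insert at any other key
lemma pv_insert_comm {κ ν : Type} [BEq κ] [LawfulBEq κ] (d : PySem.Dict κ ν) {k k' : κ} (v w : ν)
    (hk : d.contains k = true) (hne : k ≠ k') :
    (d.insert k v).insert k' w = (d.insert k' w).insert k v := by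
  apply PySem.Dict.ext
  by_cases h' : d.contains k' = true
  · rw [PySem.Dict.items_insert_of_contains _ _ (by rw [PySem.Dict.contains_insert]; simp [h']),
      PySem.Dict.items_insert_of_contains _ _ hk,
      PySem.Dict.items_insert_of_contains _ _ (by rw [PySem.Dict.contains_insert]; simp [hk]),
      PySem.Dict.items_insert_of_contains _ _ h']
    simp only [List.map_map]
    apply List.map_congr_left
    intro p _
    simp only [Function.comp_apply]
    by_cases h1 : p.1 = k
    · simp [h1, hne]
    · by_cases h2 : p.1 = k' <;> simp [h1, h2, Ne.symm hne]
  · rw [PySem.Dict.items_insert_of_not_contains _ _ (by rw [PySem.Dict.contains_insert]; simp [h', Ne.symm hne]),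
      PySem.Dict.items_insert_of_contains _ _ hk,
      PySem.Dict.items_insert_of_contains _ _ (by rw [PySem.Dict.contains_insert]; simp [hk]),
      PySem.Dict.items_insert_of_not_contains _ _ (by simpa using h')]
    rw [List.map_append]
    simp [Ne.symm hne]

lemma pv_hasSlot_elim (X : pvD1) (k : pvK) (hs : pvHasSlot X k = true) :
    X.contains k.1 = true ∧ (X.getD k.1 PySem.Dict.empty).contains k.2.1 = true ∧
    ((X.getD k.1 PySem.Dict.empty).getD k.2.1 PySem.Dict.empty).contains k.2.2 = true := by
  unfold pvHasSlot at hs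
  have h1 : X.contains k.1 = true := by
    by_contra h
    have hx : X.getD k.1 PySem.Dict.empty = PySem.Dict.empty :=
      PySem.Dict.getD_of_not_contains X _ (by simpa using h)
    rw [hx, PySem.Dict.getD_empty] at hs
    simp [PySem.Dict.contains_empty] at hs
  have h2 : (X.getD k.1 PySem.Dict.empty).contains k.2.1 = true := by
    by_contra h
    have hx : (X.getD k.1 PySem.Dict.empty).getD k.2.1 PySem.Dict.empty = PySem.Dict.empty :=
      PySem.Dict.getD_of_not_contains _ _ (by simpa using h)
    rw [hx] at hs
    simp [PySem.Dict.contains_empty] at hs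
  exact ⟨h1, h2, hs⟩

lemma pv_slotD_place (X : pvD1) (e : pvK × Int) (k : pvK) :
    pvSlotD (pvPlace X e) k = if k = e.1 then e.2 else pvSlotD X k := by
  rw [pv_place_eq]
  obtain ⟨⟨c, i, v⟩, n⟩ := e
  obtain ⟨a, b, w⟩ := k
  unfold pvNP pvSlotD
  dsimp only
  by_cases hac : a = c
  · subst hac
    rw [PySem.Dict.getD_insert_self]
    by_cases hbi : b = i
    · subst hbi
      rw [PySem.Dict.getD_insert_self]
      by_cases hwv : w = v
      · subst hwv; rw [PySem.Dict.getD_insert_self]; simp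
      · rw [PySem.Dict.getD_insert_of_ne _ _ _ hwv]; simp [hwv]
    · rw [PySem.Dict.getD_insert_of_ne _ _ _ hbi]; simp [hbi]
  · rw [PySem.Dict.getD_insert_of_ne _ _ _ hac]; simp [hac]

lemma pv_hasSlot_place (X : pvD1) (e : pvK × Int) (k : pvK) :
    pvHasSlot (pvPlace X e) k = (decide (k = e.1) || pvHasSlot X k) := by
  rw [pv_place_eq]
  obtain ⟨⟨c, i, v⟩, n⟩ := e
  obtain ⟨a, b, w⟩ := k
  unfold pvNP pvHasSlot
  dsimp only
  by_cases hac : a = c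
  · subst hac
    rw [PySem.Dict.getD_insert_self]
    by_cases hbi : b = i
    · subst hbi
      rw [PySem.Dict.getD_insert_self]
      by_cases hwv : w = v
      · subst hwv; simp [PySem.Dict.contains_insert_self]
      · rw [PySem.Dict.contains_insert]; simp [hwv]
    · rw [PySem.Dict.getD_insert_of_ne _ _ _ hbi]; simp [hbi]
  · rw [PySem.Dict.getD_insert_of_ne _ _ _ hac]; simp [hac]

lemma pv_contains_place (X : pvD1) (e : pvK × Int) (y : Int) :
    (pvPlace X e).contains y = (y == e.1.1 || X.contains y) := by
  rw [pv_place_eq]; unfold pvNP; rw [PySem.Dict.contains_insert]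

lemma pv_place_place_same (X : pvD1) (k : pvK) (m n : Int) :
    pvPlace (pvPlace X (k, m)) (k, n) = pvPlace X (k, n) := by
  simp [pv_place_eq, pvNP, PySem.Dict.getD_insert_self, PySem.Dict.insert_insert_self]

lemma pv_place_comm (X : pvD1) (k : pvK) (m : Int) (e : pvK × Int)
    (hs : pvHasSlot X k = true) (hne : e.1 ≠ k) :
    pvPlace (pvPlace X (k, m)) e = pvPlace (pvPlace X e) (k, m) := by
  obtain ⟨c, i, v⟩ := k
  obtain ⟨⟨c', i', v'⟩, n'⟩ := e
  obtain ⟨h1, h2, h3⟩ := pv_hasSlot_elim X (c, i, v) hs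
  dsimp only at h1 h2 h3 hne
  simp only [pv_place_eq, pvNP]
  by_cases hcc : c' = c
  · subst hcc
    by_cases hii : i' = i
    · subst hii
      have hvv : v' ≠ v := by simpa using hne
      simp only [PySem.Dict.getD_insert_self, PySem.Dict.insert_insert_self]
      rw [pv_insert_comm _ _ _ h3 (Ne.symm hvv)]
    · simp only [PySem.Dict.getD_insert_self, PySem.Dict.getD_insert_of_ne _ _ _ hii,
        PySem.Dict.getD_insert_of_ne _ _ _ (Ne.symm hii), PySem.Dict.insert_insert_self]
      rw [pv_insert_comm _ _ _ h2 (Ne.symm hii)]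
  · simp only [PySem.Dict.getD_insert_of_ne _ _ _ hcc,
      PySem.Dict.getD_insert_of_ne _ _ _ (Ne.symm hcc)]
    rw [pv_insert_comm _ _ _ h1 (Ne.symm hcc)]

lemma pv_slotD_foldl_not_mem (es : List (pvK × Int)) (k : pvK) (h : k ∉ es.map Prod.fst) :
    ∀ X : pvD1, pvSlotD (es.foldl pvPlace X) k = pvSlotD X k := by
  induction es with
  | nil => intro X; rfl
  | cons e tl ih =>
    intro X
    simp only [List.map_cons, List.mem_cons, not_or] at h
    rw [List.foldl_cons, ih (by simpa using h.2), pv_slotD_place, if_neg h.1]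

lemma pv_slotD_foldl_mem (es : List (pvK × Int)) (k : pvK) (n : Int)
    (hnd : (es.map Prod.fst).Nodup) (hmem : (k, n) ∈ es) :
    ∀ X : pvD1, pvSlotD (es.foldl pvPlace X) k = n := by
  induction es with
  | nil => cases hmem
  | cons e tl ih =>
    intro X
    simp only [List.map_cons, List.nodup_cons] at hnd
    rw [List.foldl_cons]
    rcases List.mem_cons.mp hmem with he | htl
    · subst he
      rw [pv_slotD_foldl_not_mem tl k (by simpa using hnd.1), pv_slotD_place]
      simp
    · exact ih hnd.2 htl (pvPlace X e)

lemma pv_foldl_place_insert (tl : List (pvK × Int)) (k : pvK) (m : Int)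
    (h : k ∉ tl.map Prod.fst) :
    ∀ X : pvD1, pvHasSlot X k = true →
      tl.foldl pvPlace (pvPlace X (k, m)) = pvPlace (tl.foldl pvPlace X) (k, m) := by
  induction tl with
  | nil => intro X _; rfl
  | cons u tl ih =>
    intro X hs
    simp only [List.map_cons, List.mem_cons, not_or] at h
    rw [List.foldl_cons, List.foldl_cons, pv_place_comm X k m u hs (fun hh => h.1 hh.symm),
      ih (by simpa using h.2) (pvPlace X u) (by rw [pv_hasSlot_place]; simp [hs])]

lemma pv_foldl_place_mapval (es : List (pvK × Int)) (k : pvK) (m : Int)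
    (hnd : (es.map Prod.fst).Nodup) (hmem : k ∈ es.map Prod.fst) :
    ∀ X : pvD1,
      (es.map (fun p => if p.1 == k then (k, m) else p)).foldl pvPlace X
        = pvPlace (es.foldl pvPlace X) (k, m) := by
  induction es with
  | nil => cases hmem
  | cons e tl ih =>
    intro X
    simp only [List.map_cons, List.nodup_cons] at hnd
    by_cases he : e.1 = k
    · have hknot : k ∉ tl.map Prod.fst := by rw [← he]; exact hnd.1
      have hmap : List.map (fun p => if (p.1 == k) = true then (k, m) else p) tl = tl := by
        conv_rhs => rw [← List.map_id tl]
        apply List.map_congr_left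
        intro p hp
        have hpk : p.1 ≠ k := fun hpk => hknot (hpk ▸ List.mem_map_of_mem hp)
        simp [hpk]
      simp only [List.map_cons, he, beq_self_eq_true, if_true, hmap, List.foldl_cons]
      have hX : pvPlace X (k, m) = pvPlace (pvPlace X e) (k, m) := by
        have : e = (k, e.2) := by rw [← he]
        rw [this, pv_place_place_same]
      rw [hX]
      exact pv_foldl_place_insert tl k m hknot (pvPlace X e)
        (by rw [pv_hasSlot_place]; simp [he])
    · have hmem' : k ∈ tl.map Prod.fst := by
        rcases List.mem_cons.mp hmem with h' | h'
        · exact absurd h'.symm he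
        · exact h'
      simp only [List.map_cons, List.foldl_cons]
      rw [if_neg (show ¬((e.1 == k) = true) by simpa using he)]
      exact ih hnd.2 hmem' (pvPlace X e)

lemma pv_foldl_place_insert_fresh (es : List (pvK × Int)) (c : Int) :
    ∀ X : pvD1, (∀ e ∈ es, X.contains e.1.1 = true) → X.contains c = false →
      es.foldl pvPlace (X.insert c PySem.Dict.empty)
        = (es.foldl pvPlace X).insert c PySem.Dict.empty := by
  induction es with
  | nil => intro X _ _; rfl
  | cons e tl ih =>
    intro X hall hc
    have hce : X.contains e.1.1 = true := hall e (List.mem_cons_self ..)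
    have hne : c ≠ e.1.1 := fun h => by rw [h] at hc; rw [hce] at hc; cases hc
    have hstep : pvPlace (X.insert c PySem.Dict.empty) e = (pvPlace X e).insert c PySem.Dict.empty := by
      rw [pv_place_eq, pv_place_eq]
      unfold pvNP
      rw [PySem.Dict.getD_insert_of_ne _ _ _ (Ne.symm hne), ← pv_insert_comm X _ _ hce (Ne.symm hne)]
    rw [List.foldl_cons, List.foldl_cons, hstep]
    exact ih (pvPlace X e)
      (fun e' he' => by rw [pv_contains_place]; simp [hall e' (List.mem_cons_of_mem _ he')])
      (by rw [pv_contains_place]; simp [hc, hne])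

lemma pv_contains_foldl_place (es : List (pvK × Int)) :
    ∀ X : pvD1, (∀ e ∈ es, X.contains e.1.1 = true) →
      ∀ y, (es.foldl pvPlace X).contains y = X.contains y := by
  induction es with
  | nil => intro X _ y; rfl
  | cons e tl ih =>
    intro X hall y
    have hce : X.contains e.1.1 = true := hall e (List.mem_cons_self ..)
    have hstep : (pvPlace X e).contains y = X.contains y := by
      rw [pv_contains_place]
      by_cases hy : y = e.1.1
      · subst hy; simp [hce]
      · simp [hy]
    rw [List.foldl_cons, ih (pvPlace X e)
      (fun e' he' => by rw [pv_contains_place]; simp [hall e' (List.mem_cons_of_mem _ he')]) y, hstep]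

-- one bump of the flat counter
def pvBump (cnt : PySem.Dict pvK Int) (k : pvK) : PySem.Dict pvK Int :=
  cnt.insert k (cnt.getD k 0 + 1)

lemma pv_keys_eq_map_fst {κ ν : Type} [BEq κ] (d : PySem.Dict κ ν) : d.keys = d.items.map Prod.fst := by
  simp only [PySem.Dict.keys]

lemma pvG1 (cnt : PySem.Dict pvK Int) (X0 : pvD1) (k : pvK)
    (hnd : cnt.keys.Nodup)
    (hempty : ∀ c', X0.getD c' PySem.Dict.empty = PySem.Dict.empty) :
    pvStepT (cnt.items.foldl pvPlace X0) k = (pvBump cnt k).items.foldl pvPlace X0 := by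
  have hndf : (cnt.items.map Prod.fst).Nodup := by rw [← pv_keys_eq_map_fst]; exact hnd
  have hslot : pvSlotD (cnt.items.foldl pvPlace X0) k = cnt.getD k 0 := by
    by_cases hkc : cnt.contains k = true
    · obtain ⟨val, hval⟩ : ∃ v, cnt.get? k = some v := by
        rcases h : cnt.get? k with _ | v
        · rw [PySem.Dict.get?_eq_none_iff_contains] at h
          rw [h] at hkc; cases hkc
        · exact ⟨v, rfl⟩
      have hmem : (k, val) ∈ cnt.items := (PySem.Dict.get?_eq_some_iff_mem_items cnt k val hnd).mp hval
      rw [pv_slotD_foldl_mem cnt.items k val hndf hmem X0, PySem.Dict.getD_eq_get?_getD, hval]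
      rfl
    · have hk' : k ∉ cnt.items.map Prod.fst := by
        rw [← pv_keys_eq_map_fst, ← PySem.Dict.contains_iff_mem_keys]
        simp [hkc]
      rw [pv_slotD_foldl_not_mem cnt.items k hk' X0,
        PySem.Dict.getD_of_not_contains _ _ (by simpa using hkc)]
      unfold pvSlotD
      rw [hempty, PySem.Dict.getD_empty, PySem.Dict.getD_empty]
  rw [pv_stepT_eq_NP, hslot]
  unfold pvBump
  by_cases hkc : cnt.contains k = true
  · rw [PySem.Dict.items_insert_of_contains _ _ hkc,
      pv_foldl_place_mapval cnt.items k (cnt.getD k 0 + 1) hndf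
        (by rw [← pv_keys_eq_map_fst, ← PySem.Dict.contains_iff_mem_keys]; exact hkc) X0,
      pv_place_eq]
  · rw [PySem.Dict.items_insert_of_not_contains _ _ (by simpa using hkc), List.foldl_append,
      List.foldl_cons, List.foldl_nil, pv_place_eq]

lemma pvG (ks : List pvK) :
    ∀ (cnt : PySem.Dict pvK Int) (X0 : pvD1),
      cnt.keys.Nodup →
      (∀ c', X0.getD c' PySem.Dict.empty = PySem.Dict.empty) →
      ks.foldl pvStepT (cnt.items.foldl pvPlace X0) = (ks.foldl pvBump cnt).items.foldl pvPlace X0 := by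
  induction ks with
  | nil => intro cnt X0 _ _; rfl
  | cons k tl ih =>
    intro cnt X0 hnd hempty
    rw [List.foldl_cons, List.foldl_cons, pvG1 cnt X0 k hnd hempty]
    exact ih (pvBump cnt k) X0 (PySem.Dict.nodup_keys_insert _ _ _ hnd) hempty

lemma pv_nodup_counts : ∀ (s : List (List Int)) (cnt : PySem.Dict pvK Int),
    cnt.keys.Nodup → (s.foldl pvCountStep cnt).keys.Nodup := by
  intro s
  induction s with
  | nil => intro cnt h; exact h
  | cons row tl ih =>
    intro cnt h
    rw [List.foldl_cons]
    refine ih _ ?_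
    unfold pvCountStep
    rcases hg : PySem.List.pyGet? row (-1) with _ | c
    · exact h
    · exact PySem.Dict.nodup_keys_foldl_insert_key _
        (fun i => (c, i, PySem.List.pyGetD row i 0))
        (fun d i => d.getD (c, i, PySem.List.pyGetD row i 0) 0 + 1) cnt h

lemma pv_counts_classes : ∀ (s : List (List Int)) (cnt : PySem.Dict pvK Int) (out : pvD1),
    (∀ k ∈ cnt.keys, out.contains k.1 = true) →
    ∀ k ∈ (s.foldl pvCountStep cnt).keys, (s.foldl pvInitStep out).contains k.1 = true := by
  intro s
  induction s with
  | nil => intro cnt out h; exact h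
  | cons row tl ih =>
    intro cnt out h
    rw [List.foldl_cons, List.foldl_cons]
    refine ih _ _ ?_
    unfold pvCountStep pvInitStep
    rcases hg : PySem.List.pyGet? row (-1) with _ | c
    · exact h
    · intro k hk
      rw [PySem.Dict.keys_foldl_insert_key, PySem.Set.update_eq_append_filter,
        List.mem_append] at hk
      rcases hk with hk | hk
      · rw [PySem.Dict.contains_setdefault]
        simp [h k hk]
      · have hk2 := List.mem_of_mem_filter hk
        have hk3 : k ∈ (PySem.List.pyRange 0 ((row.length : Int) - 1) 1).map
            (fun i => (c, i, PySem.List.pyGetD row i 0)) := (PySem.Set.mem_ofList _ _).mp hk2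
        obtain ⟨i, _, hki⟩ := List.mem_map.mp hk3
        rw [PySem.Dict.contains_setdefault]
        have : k.1 = c := by rw [← hki]
        simp [this]

lemma pv_init_empty_values : ∀ (s : List (List Int)) (out : pvD1),
    (∀ c', out.getD c' PySem.Dict.empty = PySem.Dict.empty) →
    ∀ c', (s.foldl pvInitStep out).getD c' PySem.Dict.empty = PySem.Dict.empty := by
  intro s
  induction s with
  | nil => intro out h; exact h
  | cons row tl ih =>
    intro out h
    rw [List.foldl_cons]
    refine ih _ ?_
    unfold pvInitStep
    rcases hg : PySem.List.pyGet? row (-1) with _ | c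
    · exact h
    · intro c'
      by_cases hcc : c' = c
      · subst hcc
        rw [PySem.Dict.getD_setdefault_self]
        exact h c'
      · rw [PySem.Dict.getD_eq_get?_getD, PySem.Dict.get?_setdefault_of_ne _ _ hcc,
          ← PySem.Dict.getD_eq_get?_getD]
        exact h c'

lemma pvAStep_some (d : pvD1) (row : List Int) (c : Int)
    (hc : PySem.List.pyGet? row (-1) = some c) :
    pvAStep d row = (PySem.List.pyRange 0 ((row.length : Int) - 1) 1).foldl (pvABody c row)
      (if d.contains c then d else d.insert c PySem.Dict.empty) := by
  unfold pvAStep; rw [hc]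

lemma pvCountStep_some (cnt : PySem.Dict pvK Int) (row : List Int) (c : Int)
    (hc : PySem.List.pyGet? row (-1) = some c) :
    pvCountStep cnt row = (PySem.List.pyRange 0 ((row.length : Int) - 1) 1).foldl
      (fun counts i =>
        counts.insert (c, i, PySem.List.pyGetD row i 0)
          (counts.getD (c, i, PySem.List.pyGetD row i 0) 0 + 1)) cnt := by
  unfold pvCountStep; rw [hc]

lemma pvInitStep_some (out : pvD1) (row : List Int) (c : Int)
    (hc : PySem.List.pyGet? row (-1) = some c) :
    pvInitStep out row = out.setdefault c PySem.Dict.empty := by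
  unfold pvInitStep; rw [hc]

lemma pv_main : ∀ (s : List (List Int)), (∀ row ∈ s, row ≠ []) →
    s.foldl pvAStep PySem.Dict.empty
      = (s.foldl pvCountStep PySem.Dict.empty).items.foldl pvPlace
          (s.foldl pvInitStep PySem.Dict.empty) := by
  intro s hpre
  induction s using List.reverseRecOn with
  | nil => rfl
  | append_singleton s r ih =>
    have hs : ∀ row ∈ s, row ≠ [] := fun row hrow => hpre row (List.mem_append_left _ hrow)
    have hr : r ≠ [] := hpre r (List.mem_append_right _ (List.mem_singleton_self r))
    obtain ⟨c, hc⟩ : ∃ c, PySem.List.pyGet? r (-1) = some c := by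
      rw [PySem.List.pyGet?_neg_one]
      exact Option.isSome_iff_exists.mp (List.getLast?_isSome.mpr hr)
    have IH := ih hs
    set cnt := s.foldl pvCountStep PySem.Dict.empty with hcnt
    set out0 := s.foldl pvInitStep PySem.Dict.empty with hout0
    have hnd : cnt.keys.Nodup := pv_nodup_counts s _ PySem.Dict.nodup_keys_empty
    have hempty : ∀ c', out0.getD c' PySem.Dict.empty = PySem.Dict.empty :=
      pv_init_empty_values s _ (fun c' => PySem.Dict.getD_empty c' _)
    have hall : ∀ e ∈ cnt.items, out0.contains e.1.1 = true := by
      intro e he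
      exact pv_counts_classes s PySem.Dict.empty PySem.Dict.empty
        (by intro k hk; rw [PySem.Dict.keys_empty] at hk; cases hk) e.1
        (PySem.Dict.mem_keys_of_mem_items cnt he)
    rw [List.foldl_append, List.foldl_append, List.foldl_append, ← hcnt, ← hout0, IH,
      List.foldl_cons, List.foldl_cons, List.foldl_cons, List.foldl_nil, List.foldl_nil,
      List.foldl_nil]
    rw [pvAStep_some _ r c hc, pvCountStep_some _ r c hc, pvInitStep_some _ r c hc]
    set ks : List pvK := (PySem.List.pyRange 0 ((r.length : Int) - 1) 1).map
      (fun i => (c, i, PySem.List.pyGetD r i 0)) with hks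
    have hAfold : ∀ Y : pvD1,
        (PySem.List.pyRange 0 ((r.length : Int) - 1) 1).foldl (pvABody c r) Y
          = ks.foldl pvStepT Y := by
      intro Y; rw [hks, List.foldl_map]; rfl
    have hCfold :
        (PySem.List.pyRange 0 ((r.length : Int) - 1) 1).foldl
            (fun counts i =>
              counts.insert (c, i, PySem.List.pyGetD r i 0)
                (counts.getD (c, i, PySem.List.pyGetD r i 0) 0 + 1)) cnt
          = ks.foldl pvBump cnt := by
      rw [hks, List.foldl_map]; rfl
    by_cases hcon : out0.contains c = true
    · have hxcon : (cnt.items.foldl pvPlace out0).contains c = true := by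
        rw [pv_contains_foldl_place cnt.items out0 hall c]; exact hcon
      rw [hxcon, if_pos rfl, PySem.Dict.setdefault_of_contains _ _ hcon, hAfold, hCfold]
      exact pvG ks cnt out0 hnd hempty
    · have hcon' : out0.contains c = false := by simpa using hcon
      have hxcon : (cnt.items.foldl pvPlace out0).contains c = false := by
        rw [pv_contains_foldl_place cnt.items out0 hall c]; exact hcon'
      rw [hxcon, if_neg (by simp), PySem.Dict.setdefault_of_not_contains _ _ hcon',
        hAfold, hCfold,
        ← pv_foldl_place_insert_fresh cnt.items c out0 hall hcon']
      refine pvG ks cnt (out0.insert c PySem.Dict.empty) hnd ?_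
      intro c'
      by_cases hcc : c' = c
      · subst hcc; rw [PySem.Dict.getD_insert_self]
      · rw [PySem.Dict.getD_insert_of_ne _ _ _ hcc]; exact hempty c'

-- ===== VERDICT (by name: the statement is the Claim_ definition above) =====
theorem storeDataInMemory_spec : Claim_equal_storeDataInMemory := by
  intro samples _ hpre
  unfold Spec_storeDataInMemory storeDataInMemory storeDataInMemory_alt
  rw [pv_main samples hpre]
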